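-- pv_equiv track=rewrite | github.com/Desa0197/cripto | lab3/main.py | addition_message
-- ===== SOURCE A (Python) =====
-- def addition_message(message, len_block):
--     remains = (len_block - len(message) % len_block)
--     new_mes = []
--
--     for i in range(0, len(message), len_block):
--         block = message[i:i + len_block]
--         if len(block) == len_block:
--             new_mes += block + [0]
--         else:
--             new_mes += block + [remains] * (remains + 1)
--
--     return new_mes
-- ===== SOURCE B (Python) =====
-- def addition_message(message, len_block):
--     pad = len_block - len(message) % len_block
--     out = []
--     cnt = 0
--     for x in message:
--         out.append(x)
--         cnt += 1
--         if cnt == len_block: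
--             out.append(0)
--             cnt = 0
--     if cnt != 0:
--         out += [pad] * (pad + 1)
--     return out
-- ===== Notes on version B (the rewrite author's own statement) =====
-- stated objective: alternative
-- what changed: A's stride-indexed loop that slices the message into blocks is replaced by a single streaming pass over the elements with a wrapping counter that emits a 0 separator whenever a block fills, plus one final padding append when the counter is nonzero.
-- outside the precondition, e.g. on addition_message([1], -2): A returns [], B returns [1]; on addition_message([], 0): A raises ZeroDivisionError, B raises ZeroDivisionError
import Mathlib
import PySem

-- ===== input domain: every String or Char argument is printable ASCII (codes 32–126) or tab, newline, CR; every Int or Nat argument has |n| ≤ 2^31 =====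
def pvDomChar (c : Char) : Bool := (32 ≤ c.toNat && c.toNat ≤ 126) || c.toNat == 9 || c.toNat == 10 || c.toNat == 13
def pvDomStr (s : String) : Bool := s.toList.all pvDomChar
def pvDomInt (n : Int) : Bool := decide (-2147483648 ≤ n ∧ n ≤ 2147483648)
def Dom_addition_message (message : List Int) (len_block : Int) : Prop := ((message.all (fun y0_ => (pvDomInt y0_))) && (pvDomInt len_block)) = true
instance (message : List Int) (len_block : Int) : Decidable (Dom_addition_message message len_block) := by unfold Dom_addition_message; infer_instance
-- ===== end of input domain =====

-- B replaces A's stride-indexed slicing loop by a single streaming pass with a wrapping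
-- element counter that emits a 0 separator when a block fills and one padding append at the end.

-- ===== PORT A =====
def addition_message (message : List Int) (len_block : Int) : List Int :=
  let remains : Int := len_block - PySem.Int.mod (message.length : Int) len_block
  (PySem.List.pyRange 0 (message.length : Int) len_block).foldl
    (fun new_mes i =>
      let block := PySem.List.slice message (some i) (some (i + len_block))
      if (block.length : Int) = len_block then new_mes ++ block ++ [0]
      else new_mes ++ block ++ List.replicate (remains + 1).toNat remains) []

-- ===== PORT B =====
def addition_message_alt (message : List Int) (len_block : Int) : List Int :=
  let pad : Int := len_block - PySem.Int.mod (message.length : Int) len_block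
  let res := message.foldl
    (fun (acc : List Int × Int) x =>
      let out := acc.1 ++ [x]
      let cnt := acc.2 + 1
      if cnt = len_block then (out ++ [0], 0) else (out, cnt))
    (([] : List Int), (0 : Int))
  if res.2 ≠ 0 then res.1 ++ List.replicate (pad + 1).toNat pad else res.1

-- ===== PRECONDITION & SPEC =====
-- Pre_ restricts to the natural domain of a positive block length: len_block = 0 raises
-- ZeroDivisionError in both programs, and for negative len_block A's range loop with a
-- negative step runs zero times and returns [], a corner outside the function's purpose
-- that B's streaming algorithm has no reason to mirror.
def Pre_addition_message (message : List Int) (len_block : Int) : Prop := 0 < len_block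
instance (message : List Int) (len_block : Int) : Decidable (Pre_addition_message message len_block) := by unfold Pre_addition_message; infer_instance
def pvWitness_addition_message : List Int × Int := ([1, 2, 3], 2)
def Spec_addition_message (message : List Int) (len_block : Int) (out : List Int) : Prop := out = addition_message_alt message len_block
instance (message : List Int) (len_block : Int) (out : List Int) : Decidable (Spec_addition_message message len_block out) := by unfold Spec_addition_message; infer_instance

-- ===== CLAIM (what is proved, stated in full; the proofs are below) =====
def Claim_equal_addition_message : Prop := ∀ (message : List Int) (len_block : Int), Dom_addition_message message len_block → Pre_addition_message message len_block → Spec_addition_message message len_block (addition_message message len_block)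

-- ===== LEMMAS AND PROOFS =====

-- Common characterisation: chunk the message into blocks of L, a 0 after each full block,
-- pads after a trailing partial block.
def pvChunk (L : Nat) (pads : List Int) (t : List Int) : List Int :=
  if t.isEmpty then []
  else if h : 0 < L ∧ L ≤ t.length then t.take L ++ 0 :: pvChunk L pads (t.drop L)
  else t ++ pads
termination_by t.length
decreasing_by
  simp only [List.length_drop]
  cases t with
  | nil => simp [List.isEmpty] at *
  | cons a t => simp at *; omega

theorem pvRange_pos_nil {a b s : Int} (hs : 0 < s) (h : b ≤ a) :
    PySem.List.pyRange a b s = [] := by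
  rw [PySem.List.pyRange_of_pos a b hs]
  simp [show ¬ a < b by omega]

theorem pvRange_pos_cons {a b s : Int} (hs : 0 < s) (h : a < b) :
    PySem.List.pyRange a b s = a :: PySem.List.pyRange (a + s) b s := by
  rw [PySem.List.pyRange_of_pos a b hs, PySem.List.pyRange_of_pos (a+s) b hs]
  have key : ((b - a + s - 1) / s).toNat =
      (if a + s < b then ((b - (a + s) + s - 1) / s).toNat else 0) + 1 := by
    have h1 : (b - a + s - 1) / s = (b - a - 1) / s + 1 := by
      have := Int.add_mul_ediv_right (b - a - 1) 1 (ne_of_gt hs)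
      rw [show b - a + s - 1 = b - a - 1 + 1 * s by ring, this]
    by_cases hc : a + s < b
    · rw [if_pos hc, show b - (a + s) + s - 1 = b - a - 1 by ring, h1]
      have : 0 ≤ (b - a - 1) / s := Int.ediv_nonneg (by omega) (by omega)
      omega
    · rw [if_neg hc, h1, Int.ediv_eq_zero_of_lt (by omega) (by omega)]
      decide
  rw [if_pos h, key, List.range_succ_eq_map, List.map_cons, List.map_map]
  congr 1
  · simp
  · refine List.map_congr_left ?_
    intro k _
    simp [Function.comp]
    ring

theorem pvSlice_block (message : List Int) (k : Nat) (lb : Int) (hlb : 0 < lb) :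
    PySem.List.slice message (some (k:Int)) (some ((k:Int) + lb)) = (message.drop k).take lb.toNat := by
  have h0 : (0:Int) ≤ (k:Int) := by positivity
  have h1 : (0:Int) ≤ (k:Int) + lb := by omega
  rw [PySem.List.slice_toNat message h0 h1]
  simp only [Int.toNat_natCast]
  congr 1
  omega

-- A's loop computes pvChunk.
theorem pvLoopA (message : List Int) (lb : Int) (hlb : 0 < lb) (pads : List Int) :
    ∀ m k : Nat, message.length - k = m → ∀ acc : List Int,
    ((PySem.List.pyRange (k:Int) (message.length:Int) lb).foldl
      (fun new_mes i =>
        let block := PySem.List.slice message (some i) (some (i + lb))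
        if (block.length : Int) = lb then new_mes ++ block ++ [0]
        else new_mes ++ block ++ pads) acc)
    = acc ++ pvChunk lb.toNat pads (message.drop k) := by
  intro m
  induction m using Nat.strong_induction_on with
  | _ m ih =>
    intro k hk acc
    by_cases hend : message.length ≤ k
    · rw [pvRange_pos_nil hlb (by exact_mod_cast hend)]
      rw [List.drop_eq_nil_of_le hend]
      simp [pvChunk]
    · push_neg at hend
      rw [pvRange_pos_cons hlb (by exact_mod_cast hend), List.foldl_cons]
      simp only [pvSlice_block message k lb hlb]
      have hlen : ((message.drop k).take lb.toNat).length = min lb.toNat (message.length - k) := by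
        simp
      by_cases hfull : lb ≤ (message.length : Int) - k
      · have hcond : ((((message.drop k).take lb.toNat).length : Int)) = lb := by
          rw [hlen]; omega
        rw [if_pos hcond]
        have hcast : (k:Int) + lb = ((k + lb.toNat : Nat) : Int) := by push_cast; omega
        have hlt : message.length - (k + lb.toNat) < m := by omega
        rw [hcast, ih (message.length - (k + lb.toNat)) hlt (k + lb.toNat) rfl]
        have hne : ¬ (message.drop k).isEmpty = true := by
          simp [List.isEmpty_iff]; omega
        have hcond2 : 0 < lb.toNat ∧ lb.toNat ≤ (message.drop k).length := by
          constructor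
          · omega
          · simp
            omega
        conv_rhs => rw [pvChunk]
        rw [if_neg hne, dif_pos hcond2, List.drop_drop]
        simp [List.append_assoc]
      · push_neg at hfull
        have htake : (message.drop k).take lb.toNat = message.drop k :=
          List.take_of_length_le (by simp; omega)
        have hcond : ¬ ((((message.drop k).take lb.toNat).length : Int)) = lb := by
          rw [hlen]; omega
        rw [if_neg hcond]
        rw [pvRange_pos_nil hlb (by omega), List.foldl_nil]
        have hne : ¬ (message.drop k).isEmpty = true := by
          simp [List.isEmpty_iff]; omega
        have hcond2 : ¬ (0 < lb.toNat ∧ lb.toNat ≤ (message.drop k).length) := by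
          simp
          intro _
          omega
        conv_rhs => rw [pvChunk]
        rw [if_neg hne, dif_neg hcond2, htake]
        simp [List.append_assoc]

def pvStep (lb : Int) : List Int × Int → Int → List Int × Int :=
  fun acc x =>
    let out := acc.1 ++ [x]
    let cnt := acc.2 + 1
    if cnt = lb then (out ++ [0], 0) else (out, cnt)

-- B's fold over a too-short suffix just appends it and counts it.
theorem pvFold_partial (lb : Int) :
    ∀ (u : List Int) (acc : List Int) (c : Int), c + (u.length : Int) < lb →
    u.foldl (pvStep lb) (acc, c) = (acc ++ u, c + u.length) := by
  intro u
  induction u with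
  | nil => intro acc c _; simp
  | cons x u ihu =>
    intro acc c h
    simp only [List.foldl_cons]
    have hne : ¬ c + 1 = lb := by
      simp [List.length_cons] at h
      push_cast at h
      omega
    simp only [pvStep, if_neg hne]
    rw [ihu (acc ++ [x]) (c + 1) (by simp at h ⊢; push_cast at h ⊢; omega)]
    simp
    push_cast
    ring

-- B's fold over a block that exactly fills the counter appends it plus a 0 and resets.
theorem pvFold_block (lb : Int) :
    ∀ (u : List Int) (acc : List Int) (c : Int), u ≠ [] → c + (u.length : Int) = lb →
    u.foldl (pvStep lb) (acc, c) = (acc ++ u ++ [0], 0) := by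
  intro u
  induction u with
  | nil => intro acc c h _; exact absurd rfl h
  | cons x u ihu =>
    intro acc c _ h
    simp only [List.foldl_cons]
    cases u with
    | nil =>
      have hc : c + 1 = lb := by simpa using h
      simp [pvStep, hc]
    | cons y u =>
      have hne : ¬ c + 1 = lb := by
        simp [List.length_cons] at h
        push_cast at h
        omega
      simp only [pvStep, if_neg hne]
      rw [ihu (acc ++ [x]) (c + 1) (by simp) (by simp at h ⊢; push_cast at h ⊢; omega)]
      simp

-- B's whole pass (fold then optional padding) computes pvChunk.
theorem pvLoopB (lb : Int) (hlb : 0 < lb) (pads : List Int) :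
    ∀ (m : Nat) (t : List Int), t.length = m → ∀ acc : List Int,
    (if (t.foldl (pvStep lb) (acc, 0)).2 ≠ 0
      then (t.foldl (pvStep lb) (acc, 0)).1 ++ pads
      else (t.foldl (pvStep lb) (acc, 0)).1)
    = acc ++ pvChunk lb.toNat pads t := by
  intro m
  induction m using Nat.strong_induction_on with
  | _ m ih =>
    intro t ht acc
    by_cases hshort : (t.length : Int) < lb
    · rw [pvFold_partial lb t acc 0 (by omega)]
      cases t with
      | nil => simp [pvChunk]
      | cons x u =>
        have hm : u.length + 1 = (x :: u).length := by simp
        simp only [zero_add]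
        rw [if_pos (by simp; omega)]
        conv_rhs => rw [pvChunk]
        rw [if_neg (by simp), dif_neg (by simp; omega)]
        simp [List.append_assoc]
    · push_neg at hshort
      have hsplit : t = t.take lb.toNat ++ t.drop lb.toNat := by simp
      have htlen : (t.take lb.toNat).length = lb.toNat := by
        simp; omega
      conv_lhs => rw [hsplit]
      rw [List.foldl_append]
      rw [pvFold_block lb (t.take lb.toNat) acc 0
        (by intro hnil; rw [hnil] at htlen; simp at htlen; omega)
        (by rw [htlen]; push_cast; omega)]
      have hlt : (t.drop lb.toNat).length < m := by
        simp; omega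
      rw [ih (t.drop lb.toNat).length hlt (t.drop lb.toNat) rfl (acc ++ t.take lb.toNat ++ [0])]
      conv_rhs => rw [pvChunk]
      rw [if_neg (by simp [List.isEmpty_iff]; intro hnil; rw [hnil] at hshort; simp at hshort; omega),
        dif_pos (by refine ⟨by omega, by simpa using (by omega : lb.toNat ≤ t.length)⟩)]
      simp [List.append_assoc]

theorem pv_main (message : List Int) (lb : Int) (hlb : 0 < lb) :
    addition_message message lb = addition_message_alt message lb := by
  have hA := pvLoopA message lb hlb
    (List.replicate (lb - PySem.Int.mod (message.length : Int) lb + 1).toNat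
      (lb - PySem.Int.mod (message.length : Int) lb)) message.length 0 rfl []
  have hB := pvLoopB lb hlb
    (List.replicate (lb - PySem.Int.mod (message.length : Int) lb + 1).toNat
      (lb - PySem.Int.mod (message.length : Int) lb)) message.length message rfl []
  simp only [Nat.cast_zero, List.drop_zero, List.nil_append] at hA hB
  simp only [addition_message, addition_message_alt]
  rw [hA]
  rw [← hB]
  rfl

-- ===== VERDICT (by name: the statement is the Claim_ definition above) =====
theorem addition_message_spec : Claim_equal_addition_message := by
  intro message len_block _ hpre
  unfold Spec_addition_message
  exact pv_main message len_block hpre
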